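-- pv_equiv track=rewrite | github.com/qoqosz/Advent-of-Code-2022 | day23/p23.py | eval_moves
-- ===== SOURCE A (Python) =====
-- from collections import Counter, deque
--
-- def eval_moves(proposals):
--     cnt = Counter(proposals.values())
--     moves, stay = {}, set()
--
--     for k, v in proposals.items():
--         if v is None:
--             moves[k] = k
--         elif cnt[v] == 1:
--             moves[k] = v
--
--     return moves
-- ===== SOURCE B (Python) =====
-- def eval_moves(proposals):
--     # Online conflict resolution in a single pass: claim a destination on first
--     # sight, and when a second elf proposes the same destination, retract the
--     # earlier claim and mark the destination contested.
--     moves = {}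
--     owner = {}  # destination -> claiming key; None once contested
--     for k, v in proposals.items():
--         if v is None:
--             moves[k] = k
--         elif v not in owner:
--             owner[v] = k
--             moves[k] = v
--         else:
--             prev = owner[v]
--             if prev is not None:
--                 del moves[prev]
--                 owner[v] = None
--     return moves
-- ===== Notes on version B (the rewrite author's own statement) =====
-- stated objective: alternative
-- what changed: Replaces A's two-phase count-then-filter (Counter of all values, then keep items with cnt[v]==1) by a single online pass that claims a destination on first sight and, via an owner map, retracts the earlier claim and marks the destination contested when a second proposer appears.
import Mathlib
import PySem

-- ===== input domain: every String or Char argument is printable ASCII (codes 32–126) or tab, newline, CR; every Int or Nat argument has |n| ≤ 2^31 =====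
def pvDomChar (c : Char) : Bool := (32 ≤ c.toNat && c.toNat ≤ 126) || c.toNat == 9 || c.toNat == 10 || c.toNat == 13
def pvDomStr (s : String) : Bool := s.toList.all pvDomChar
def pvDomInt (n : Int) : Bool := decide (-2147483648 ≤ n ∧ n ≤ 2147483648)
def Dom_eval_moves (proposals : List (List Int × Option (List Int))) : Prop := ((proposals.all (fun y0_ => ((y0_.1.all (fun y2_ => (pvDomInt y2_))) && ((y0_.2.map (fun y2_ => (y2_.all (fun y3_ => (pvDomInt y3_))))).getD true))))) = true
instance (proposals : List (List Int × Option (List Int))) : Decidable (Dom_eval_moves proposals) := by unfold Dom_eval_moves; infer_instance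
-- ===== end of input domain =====

-- B replaces A's count-then-filter (Counter of all proposed values, then keep items with
-- cnt[v] == 1) by a single online pass: a destination is claimed on first sight, and when a
-- second proposer appears the earlier claim is deleted and the destination marked contested
-- (alternative decomposition, same cost). An input dict is modelled as an assoc list.

-- ===== PORT A =====
def eval_moves (proposals : List (List Int × Option (List Int))) : List (List Int × List Int) :=
  let cnt : PySem.Dict (Option (List Int)) Int := PySem.Dict.counter (proposals.map (·.2))
  let moves : PySem.Dict (List Int) (List Int) :=
    proposals.foldl (fun m kv =>
      match kv.2 with
      | none => m.insert kv.1 kv.1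
      | some v => if cnt.getD (some v) 0 == 1 then m.insert kv.1 v else m)
      PySem.Dict.empty
  moves.items

-- ===== PORT B =====
-- the loop body of Source B: (moves, owner) updated by one item
def pvStepB (st : PySem.Dict (List Int) (List Int) × PySem.Dict (List Int) (Option (List Int)))
    (kv : List Int × Option (List Int)) :
    PySem.Dict (List Int) (List Int) × PySem.Dict (List Int) (Option (List Int)) :=
  match kv.2 with
  | none => (st.1.insert kv.1 kv.1, st.2)
  | some v =>
    match st.2.get? v with
    | none => (st.1.insert kv.1 v, st.2.insert v (some kv.1))
    | some (some p) => (st.1.erase p, st.2.insert v none)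
    | some none => st

def eval_moves_alt (proposals : List (List Int × Option (List Int))) : List (List Int × List Int) :=
  (proposals.foldl pvStepB (PySem.Dict.empty, PySem.Dict.empty)).1.items

-- ===== PRECONDITION & SPEC =====
-- Pre_ excludes association lists with duplicate keys: those do not represent a Python dict
-- (the dict constructor collapses them before either function runs), so the list encoding is ambiguous there.
def Pre_eval_moves (proposals : List (List Int × Option (List Int))) : Prop :=
  (proposals.map Prod.fst).Nodup
instance (proposals : List (List Int × Option (List Int))) : Decidable (Pre_eval_moves proposals) := by unfold Pre_eval_moves; infer_instance
def pvWitness_eval_moves : (List (List Int × Option (List Int))) := [([0], none), ([1], some [2])]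

def Spec_eval_moves (proposals : List (List Int × Option (List Int))) (out : List (List Int × List Int)) : Prop := out = eval_moves_alt proposals
instance (proposals : List (List Int × Option (List Int))) (out : List (List Int × List Int)) : Decidable (Spec_eval_moves proposals out) := by unfold Spec_eval_moves; infer_instance

-- ===== CLAIM (what is proved, stated in full; the proofs are below) =====
def Claim_equal_eval_moves : Prop := ∀ (proposals : List (List Int × Option (List Int))), Dom_eval_moves proposals → Pre_eval_moves proposals → Spec_eval_moves proposals (eval_moves proposals)

-- ===== LEMMAS AND PROOFS =====

-- the common normal form: keep items whose value is None or uniquely proposed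
def pvCanon (P : List (List Int × Option (List Int))) : List (List Int × List Int) :=
  (P.filter (fun kv => kv.2 == none || (P.map (·.2)).count kv.2 == 1)).map
    (fun kv => (kv.1, kv.2.getD kv.1))

theorem pvA_canon (P : List (List Int × Option (List Int)))
    (hnd : (P.map Prod.fst).Nodup) : eval_moves P = pvCanon P := by
  unfold eval_moves pvCanon
  simp only []
  set vs := P.map (·.2) with hvs
  set cnt := PySem.Dict.counter (κ := Option (List Int)) vs with hcnt
  have hstep : P.foldl (fun (m : PySem.Dict (List Int) (List Int)) kv =>
      match kv.2 with
      | none => m.insert kv.1 kv.1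
      | some v => if cnt.getD (some v) 0 == 1 then m.insert kv.1 v else m)
      PySem.Dict.empty
      = P.foldl (fun m kv =>
          if (kv.2 == none || cnt.getD kv.2 0 == 1) then m.insert kv.1 (kv.2.getD kv.1) else m)
      PySem.Dict.empty := by
    apply PySem.List.foldl_congr_mem
    intro m kv _
    rcases kv with ⟨k, v⟩
    cases v with
    | none => simp
    | some w => by_cases h : cnt.getD (some w) 0 = 1 <;> simp [h]
  rw [hstep, PySem.List.foldl_if_eq_foldl_filter]
  have hnodupk : ((P.filter (fun kv => kv.2 == none || cnt.getD kv.2 0 == 1)).map Prod.fst).Nodup :=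
    hnd.sublist (List.filter_sublist.map Prod.fst)
  rw [PySem.Dict.items_foldl_insert_fresh
        (l := P.filter (fun kv => kv.2 == none || cnt.getD kv.2 0 == 1))
        (k := Prod.fst) (v := fun kv => kv.2.getD kv.1) (d := PySem.Dict.empty)
        (fun a _ => PySem.Dict.contains_empty _) hnodupk]
  simp only [PySem.Dict.empty, List.nil_append]
  congr 1
  apply List.filter_congr
  intro kv _
  have hc : cnt.getD kv.2 0 = (vs.count kv.2 : Int) := PySem.Dict.getD_counter vs kv.2
  show (kv.2 == none || cnt.getD kv.2 0 == 1) = (kv.2 == none || vs.count kv.2 == 1)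
  by_cases h1 : vs.count kv.2 = 1
  · simp [hc, h1]
  · have h2 : ((vs.count kv.2 : Int) == 1) = false := by
      simp; exact_mod_cast h1
    have h3 : ((vs.count kv.2 : Nat) == 1) = false := by simp [h1]
    simp [hc, h2, h3]

-- value-count as a countP over the pairs
theorem pvCount_snd (P : List (List Int × Option (List Int))) (y : Option (List Int)) :
    (P.map (·.2)).count y = P.countP (fun kv => kv.2 == y) := by
  rw [List.count_eq_countP, List.countP_map]; rfl

-- a uniquely proposed value has a unique proposing pair
theorem pvFilter_singleton (P : List (List Int × Option (List Int)))
    (v : Option (List Int)) (h1 : (P.map (·.2)).count v = 1)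
    (kv0 : List Int × Option (List Int)) (h0 : kv0 ∈ P) (h2 : kv0.2 = v) :
    P.filter (fun kv => kv.2 == v) = [kv0] := by
  rw [pvCount_snd] at h1
  rw [List.countP_eq_length_filter] at h1
  obtain ⟨a, ha⟩ := List.length_eq_one_iff.mp h1
  have : kv0 ∈ P.filter (fun kv => kv.2 == v) := by
    rw [List.mem_filter]; exact ⟨h0, by simp [h2]⟩
  rw [ha] at this ⊢
  simp at this; rw [this]

theorem pvEq_of_unique (P : List (List Int × Option (List Int)))
    (v : Option (List Int)) (h1 : (P.map (·.2)).count v = 1)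
    (kv0 : List Int × Option (List Int)) (h0 : kv0 ∈ P) (h2 : kv0.2 = v)
    (kv : List Int × Option (List Int)) (h3 : kv ∈ P) (h4 : kv.2 = v) : kv = kv0 := by
  have hmem : kv ∈ P.filter (fun kv => kv.2 == v) := by
    rw [List.mem_filter]; exact ⟨h3, by simp [h4]⟩
  rw [pvFilter_singleton P v h1 kv0 h0 h2] at hmem
  simpa using hmem

-- a dict whose items are pvCanon P contains no key outside P's keys
theorem pvM_not_contains (P : List (List Int × Option (List Int))) (k : List Int)
    (hk : k ∉ P.map Prod.fst) (M : PySem.Dict (List Int) (List Int))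
    (hM : M.items = pvCanon P) : M.contains k = false := by
  rw [PySem.Dict.contains_eq_decide_mem_keys, decide_eq_false_iff_not]
  intro hmem
  apply hk
  have : M.keys = M.items.map (·.1) := rfl
  rw [this, hM, pvCanon, List.map_map] at hmem
  obtain ⟨kv, hkv, hkeq⟩ := List.mem_map.mp hmem
  exact hkeq ▸ List.mem_map_of_mem (List.mem_of_mem_filter hkv)


theorem pvCaseNone (P : List (List Int × Option (List Int))) (x : List Int × Option (List Int))
    (hx2 : x.2 = none)
    (st : PySem.Dict (List Int) (List Int) × PySem.Dict (List Int) (Option (List Int)))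
    (hndP : (P.map Prod.fst).Nodup) (hx1 : x.1 ∉ P.map Prod.fst)
    (ihM : st.1.items = pvCanon P)
    (ihO : ∀ v : List Int, st.2.get? v = (P.find? (fun kv => kv.2 == some v)).map
      (fun kv0 => if (P.map (·.2)).count (some v) == 1 then some kv0.1 else none))
    (hcnt_ne : ∀ y : Option (List Int), y ≠ x.2 →
      ((P ++ [x]).map (·.2)).count y = (P.map (·.2)).count y) :
    (pvStepB st x).1.items = pvCanon (P ++ [x]) ∧
    ∀ v : List Int, (pvStepB st x).2.get? v =
      ((P ++ [x]).find? (fun kv => kv.2 == some v)).map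
        (fun kv0 => if ((P ++ [x]).map (·.2)).count (some v) == 1 then some kv0.1 else none) := by
  have hstep : pvStepB st x = (st.1.insert x.1 x.1, st.2) := by
    unfold pvStepB; rw [hx2]
  have hcanon : pvCanon (P ++ [x]) = pvCanon P ++ [(x.1, x.1)] := by
    unfold pvCanon
    rw [List.filter_append, List.map_append]
    congr 1
    · congr 1
      apply List.filter_congr
      intro kv _
      cases hkv2 : kv.2 with
      | none => simp
      | some w =>
        have h := hcnt_ne (some w) (by rw [hx2]; simp)
        rw [h]
    · simp [hx2]
  constructor
  · rw [hstep]
    have hcon : st.1.contains x.1 = false := pvM_not_contains P x.1 hx1 st.1 ihM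
    rw [PySem.Dict.items_insert_of_not_contains _ _ hcon, ihM, hcanon]
  · intro v
    rw [hstep]
    have hcv := hcnt_ne (some v) (by rw [hx2]; simp)
    rw [ihO v, List.find?_append, hcv]
    have hfx : [x].find? (fun kv => kv.2 == some v) = none := by simp [hx2]
    rw [hfx, Option.or_none]

theorem pvCaseFirst (P : List (List Int × Option (List Int))) (x : List Int × Option (List Int))
    (v0 : List Int) (hx2 : x.2 = some v0)
    (st : PySem.Dict (List Int) (List Int) × PySem.Dict (List Int) (Option (List Int)))
    (hndP : (P.map Prod.fst).Nodup) (hx1 : x.1 ∉ P.map Prod.fst)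
    (hO : st.2.get? v0 = none)
    (ihM : st.1.items = pvCanon P)
    (ihO : ∀ v : List Int, st.2.get? v = (P.find? (fun kv => kv.2 == some v)).map
      (fun kv0 => if (P.map (·.2)).count (some v) == 1 then some kv0.1 else none))
    (hcnt_ne : ∀ y : Option (List Int), y ≠ x.2 →
      ((P ++ [x]).map (·.2)).count y = (P.map (·.2)).count y)
    (hcnt_eq : ((P ++ [x]).map (·.2)).count x.2 = (P.map (·.2)).count x.2 + 1) :
    (pvStepB st x).1.items = pvCanon (P ++ [x]) ∧
    ∀ v : List Int, (pvStepB st x).2.get? v =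
      ((P ++ [x]).find? (fun kv => kv.2 == some v)).map
        (fun kv0 => if ((P ++ [x]).map (·.2)).count (some v) == 1 then some kv0.1 else none) := by
  have hstep : pvStepB st x = (st.1.insert x.1 v0, st.2.insert v0 (some x.1)) := by
    unfold pvStepB; rw [hx2]; simp only [hO]
  have hfind : P.find? (fun kv => kv.2 == some v0) = none := by
    rw [ihO v0] at hO
    exact Option.map_eq_none_iff.mp hO
  have hnomem : ∀ kv ∈ P, kv.2 ≠ some v0 := by
    intro kv hkv
    have := List.find?_eq_none.mp hfind kv hkv
    simpa using this
  have hcount0 : (P.map (·.2)).count (some v0) = 0 := by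
    rw [pvCount_snd, List.countP_eq_zero]
    intro kv hkv; simpa using hnomem kv hkv
  have hcnew : ((P ++ [x]).map (·.2)).count (some v0) = 1 := by
    have := hcnt_eq; rw [hx2] at this; rw [this, hcount0]
  have hcanon : pvCanon (P ++ [x]) = pvCanon P ++ [(x.1, v0)] := by
    unfold pvCanon
    rw [List.filter_append, List.map_append]
    congr 1
    · congr 1
      apply List.filter_congr
      intro kv hkv
      cases hkv2 : kv.2 with
      | none => simp
      | some w =>
        have hw : w ≠ v0 := fun h => hnomem kv hkv (by rw [hkv2, h])
        have h := hcnt_ne (some w) (by rw [hx2]; simp [hw])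
        rw [h]
    · simp [hx2, hcount0]
  constructor
  · rw [hstep]
    have hcon : st.1.contains x.1 = false := pvM_not_contains P x.1 hx1 st.1 ihM
    rw [PySem.Dict.items_insert_of_not_contains _ _ hcon, ihM, hcanon]
  · intro v
    rw [hstep]
    by_cases hv : v = v0
    · subst hv
      rw [PySem.Dict.get?_insert_self]
      have hfx : [x].find? (fun kv => kv.2 == some v) = some x := by simp [hx2]
      rw [List.find?_append, hfind, hfx, Option.none_or, hcnew]
      simp
    · rw [PySem.Dict.get?_insert_of_ne (hne := hv), ihO v]
      have hcv := hcnt_ne (some v) (by rw [hx2]; simp [hv])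
      have hfx : [x].find? (fun kv => kv.2 == some v) = none := by
        simp [hx2]; exact fun h => hv h.symm
      rw [List.find?_append, hfx, Option.or_none, hcv]

theorem pvCaseSecond (P : List (List Int × Option (List Int))) (x : List Int × Option (List Int))
    (v0 p : List Int) (hx2 : x.2 = some v0)
    (st : PySem.Dict (List Int) (List Int) × PySem.Dict (List Int) (Option (List Int)))
    (hndP : (P.map Prod.fst).Nodup) (hx1 : x.1 ∉ P.map Prod.fst)
    (hO : st.2.get? v0 = some (some p))
    (ihM : st.1.items = pvCanon P)
    (ihO : ∀ v : List Int, st.2.get? v = (P.find? (fun kv => kv.2 == some v)).map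
      (fun kv0 => if (P.map (·.2)).count (some v) == 1 then some kv0.1 else none))
    (hcnt_ne : ∀ y : Option (List Int), y ≠ x.2 →
      ((P ++ [x]).map (·.2)).count y = (P.map (·.2)).count y)
    (hcnt_eq : ((P ++ [x]).map (·.2)).count x.2 = (P.map (·.2)).count x.2 + 1) :
    (pvStepB st x).1.items = pvCanon (P ++ [x]) ∧
    ∀ v : List Int, (pvStepB st x).2.get? v =
      ((P ++ [x]).find? (fun kv => kv.2 == some v)).map
        (fun kv0 => if ((P ++ [x]).map (·.2)).count (some v) == 1 then some kv0.1 else none) := by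
  have hstep : pvStepB st x = (st.1.erase p, st.2.insert v0 none) := by
    unfold pvStepB; rw [hx2]; simp only [hO]
  rw [ihO v0] at hO
  obtain ⟨kv0, hfind, hf⟩ := Option.map_eq_some_iff.mp hO
  have hkv0P : kv0 ∈ P := List.mem_of_find?_eq_some hfind
  have hkv02 : kv0.2 = some v0 := by
    have := List.find?_some hfind; simpa using this
  have hcount1 : (P.map (·.2)).count (some v0) = 1 := by
    by_contra h
    rw [if_neg (by simpa using h)] at hf
    simp at hf
  have hp : kv0.1 = p := by
    rw [if_pos (by simp [hcount1])] at hf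
    simpa using hf
  have hinj := List.inj_on_of_nodup_map hndP
  have huniq : ∀ kv ∈ P, kv.2 = some v0 → kv = kv0 :=
    fun kv hkv h => pvEq_of_unique P (some v0) hcount1 kv0 hkv0P hkv02 kv hkv h
  have hkeyne : ∀ kv ∈ P, kv.2 ≠ some v0 → (kv.1 == p) = false := by
    intro kv hkv hne
    rw [beq_eq_false_iff_ne]
    intro h
    exact hne (by rw [hinj hkv hkv0P (h.trans hp.symm), hkv02])
  have hcnew : ((P ++ [x]).map (·.2)).count (some v0) = 2 := by
    have := hcnt_eq; rw [hx2] at this; rw [this, hcount1]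
  have hcanon : pvCanon (P ++ [x]) =
      (pvCanon P).filter (fun q => !(q.1 == p)) := by
    unfold pvCanon
    rw [List.filter_append, List.map_append, List.filter_map, List.filter_filter]
    have hfx : [x].filter (fun kv => kv.2 == none ||
        ((P ++ [x]).map (·.2)).count kv.2 == 1) = [] := by
      simp [hx2, hcount1]
    rw [hfx, List.map_nil, List.append_nil]
    congr 1
    apply List.filter_congr
    intro kv hkv
    cases hkv2 : kv.2 with
    | none =>
      have := hkeyne kv hkv (by rw [hkv2]; simp)
      simp [this, Function.comp]
    | some w =>
      by_cases hw : w = v0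
      · subst hw
        have heq : kv = kv0 := huniq kv hkv hkv2
        have : (kv.1 == p) = true := by rw [heq, hp]; simp
        simp [hx2, hcount1, this, Function.comp]
      · have hk := hkeyne kv hkv (by rw [hkv2]; simp [hw])
        have h := hcnt_ne (some w) (by rw [hx2]; simp [hw])
        have hcw : List.count (some w) [some v0] = 0 := by simp [Ne.symm hw]
        simp [hx2, hk, hcw, Function.comp]
  constructor
  · rw [hstep]
    show (st.1.erase p).items = _
    have herase : (st.1.erase p).items = st.1.items.filter (fun q => !(q.1 == p)) := rfl
    rw [herase, ihM, hcanon]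
  · intro v
    rw [hstep]
    by_cases hv : v = v0
    · subst hv
      rw [PySem.Dict.get?_insert_self]
      rw [List.find?_append, hfind, Option.some_or, hcnew]
      simp
    · rw [PySem.Dict.get?_insert_of_ne (hne := hv), ihO v]
      have hcv := hcnt_ne (some v) (by rw [hx2]; simp [hv])
      have hfx : [x].find? (fun kv => kv.2 == some v) = none := by
        simp [hx2]; exact fun h => hv h.symm
      rw [List.find?_append, hfx, Option.or_none, hcv]

theorem pvCaseLater (P : List (List Int × Option (List Int))) (x : List Int × Option (List Int))
    (v0 : List Int) (hx2 : x.2 = some v0)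
    (st : PySem.Dict (List Int) (List Int) × PySem.Dict (List Int) (Option (List Int)))
    (hndP : (P.map Prod.fst).Nodup) (hx1 : x.1 ∉ P.map Prod.fst)
    (hO : st.2.get? v0 = some none)
    (ihM : st.1.items = pvCanon P)
    (ihO : ∀ v : List Int, st.2.get? v = (P.find? (fun kv => kv.2 == some v)).map
      (fun kv0 => if (P.map (·.2)).count (some v) == 1 then some kv0.1 else none))
    (hcnt_ne : ∀ y : Option (List Int), y ≠ x.2 →
      ((P ++ [x]).map (·.2)).count y = (P.map (·.2)).count y)
    (hcnt_eq : ((P ++ [x]).map (·.2)).count x.2 = (P.map (·.2)).count x.2 + 1) :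
    (pvStepB st x).1.items = pvCanon (P ++ [x]) ∧
    ∀ v : List Int, (pvStepB st x).2.get? v =
      ((P ++ [x]).find? (fun kv => kv.2 == some v)).map
        (fun kv0 => if ((P ++ [x]).map (·.2)).count (some v) == 1 then some kv0.1 else none) := by
  have hstep : pvStepB st x = st := by
    unfold pvStepB; rw [hx2]; simp only [hO]
  rw [ihO v0] at hO
  obtain ⟨kv0, hfind, hf⟩ := Option.map_eq_some_iff.mp hO
  have hkv0P : kv0 ∈ P := List.mem_of_find?_eq_some hfind
  have hkv02 : kv0.2 = some v0 := by
    have := List.find?_some hfind; simpa using this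
  have hcne1 : (P.map (·.2)).count (some v0) ≠ 1 := by
    intro h
    rw [if_pos (by simp [h])] at hf
    simp at hf
  have hcpos : 0 < (P.map (·.2)).count (some v0) := by
    apply List.count_pos_iff.mpr
    rw [← hkv02]
    exact List.mem_map_of_mem hkv0P
  have hc2 : 2 ≤ (P.map (·.2)).count (some v0) := by omega
  have hcnew : ((P ++ [x]).map (·.2)).count (some v0) =
      (P.map (·.2)).count (some v0) + 1 := by
    have := hcnt_eq; rw [hx2] at this; exact this
  have hcnew1 : (((P ++ [x]).map (·.2)).count (some v0) == 1) = false := by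
    simp only [hcnew]; simp; omega
  have hcanon : pvCanon (P ++ [x]) = pvCanon P := by
    unfold pvCanon
    rw [List.filter_append, List.map_append]
    have hfx : [x].filter (fun kv => kv.2 == none ||
        ((P ++ [x]).map (·.2)).count kv.2 == 1) = [] := by
      simp [hx2]; omega
    rw [hfx, List.map_nil, List.append_nil]
    congr 1
    apply List.filter_congr
    intro kv hkv
    cases hkv2 : kv.2 with
    | none => simp
    | some w =>
      by_cases hw : w = v0
      · subst hw
        rw [hcnew1]
        simp [hcne1]
      · have h := hcnt_ne (some w) (by rw [hx2]; simp [hw])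
        rw [h]
  constructor
  · rw [hstep, ihM, hcanon]
  · intro v
    rw [hstep]
    by_cases hv : v = v0
    · subst hv
      rw [ihO v, List.find?_append, hfind, Option.some_or]
      have h1 : ((P.map (·.2)).count (some v) == 1) = false := by
        simp [hcne1]
      rw [Option.map_some, Option.map_some, h1, hcnew1]
    · rw [ihO v]
      have hcv := hcnt_ne (some v) (by rw [hx2]; simp [hv])
      have hfx : [x].find? (fun kv => kv.2 == some v) = none := by
        simp [hx2]; exact fun h => hv h.symm
      rw [List.find?_append, hfx, Option.or_none, hcv]

theorem pvB_inv (P : List (List Int × Option (List Int)))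
    (hnd : (P.map Prod.fst).Nodup) :
    (P.foldl pvStepB (PySem.Dict.empty, PySem.Dict.empty)).1.items = pvCanon P ∧
    ∀ v : List Int, (P.foldl pvStepB (PySem.Dict.empty, PySem.Dict.empty)).2.get? v =
      (P.find? (fun kv => kv.2 == some v)).map
        (fun kv0 => if (P.map (·.2)).count (some v) == 1 then some kv0.1 else none) := by
  revert hnd
  induction P using List.reverseRecOn with
  | nil => exact fun _ => ⟨rfl, fun v => rfl⟩
  | append_singleton P x ih =>
    intro hnd
    have hnd2 : (P.map Prod.fst).Nodup ∧ x.1 ∉ P.map Prod.fst := by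
      rw [List.map_append, List.nodup_append] at hnd
      exact ⟨hnd.1, fun h => by simpa using hnd.2.2 x.1 h⟩
    obtain ⟨hndP, hx1⟩ := hnd2
    obtain ⟨ihM, ihO⟩ := ih hndP
    rw [List.foldl_append, List.foldl_cons, List.foldl_nil]
    set st := P.foldl pvStepB ((PySem.Dict.empty : PySem.Dict (List Int) (List Int)),
      (PySem.Dict.empty : PySem.Dict (List Int) (Option (List Int)))) with hst
    have hcnt_ne : ∀ y : Option (List Int), y ≠ x.2 →
        ((P ++ [x]).map (·.2)).count y = (P.map (·.2)).count y := by
      intro y hy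
      simp [List.count_append, Ne.symm hy]
    have hcnt_eq : ((P ++ [x]).map (·.2)).count x.2 = (P.map (·.2)).count x.2 + 1 := by
      simp [List.count_append]
    rcases hx2 : x.2 with _ | v0
    · exact pvCaseNone P x hx2 st hndP hx1 ihM ihO hcnt_ne
    · rcases hO : st.2.get? v0 with _ | (_ | p)
      · exact pvCaseFirst P x v0 hx2 st hndP hx1 hO ihM ihO hcnt_ne hcnt_eq
      · exact pvCaseLater P x v0 hx2 st hndP hx1 hO ihM ihO hcnt_ne hcnt_eq
      · exact pvCaseSecond P x v0 p hx2 st hndP hx1 hO ihM ihO hcnt_ne hcnt_eq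

-- ===== VERDICT (by name: the statement is the Claim_ definition above) =====
theorem eval_moves_spec : Claim_equal_eval_moves := by
  intro proposals _hdom hpre
  unfold Spec_eval_moves eval_moves_alt
  rw [(pvB_inv proposals hpre).1, pvA_canon proposals hpre]
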